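-- pv_equiv track=rewrite | github.com/1PhoenixM/wikipedia-content-detector | project/views.py | findTrigrams
-- ===== SOURCE A (Python) =====
-- bigram_mincount = 2
--
-- def findTrigrams(wordlist):
--     featureset = {}
--     for w in range(0, len(wordlist)-2):
--         word_one = wordlist[w]
--         word_two = wordlist[w+1]
--         word_three = wordlist[w+2]
--         trigram = word_one + ' ' + word_two + ' ' + word_three
--         if trigram in featureset:
--             featureset[trigram] += 1
--         else:
--             featureset[trigram] = 1
--     for trigram in list(featureset.keys()):
--         if featureset[trigram] < bigram_mincount:
--             del featureset[trigram]
--     return featureset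
-- ===== SOURCE B (Python) =====
-- bigram_mincount = 2
--
-- def _runs(s):
--     # run-length encoding of a (sorted) list: [(value, run length), ...]
--     runs = []
--     i = 0
--     n = len(s)
--     while i < n:
--         j = i + 1
--         while j < n and s[j] == s[i]:
--             j += 1
--         runs.append((s[i], j - i))
--         i = j
--     return runs
--
-- def findTrigrams(wordlist):
--     tri = [wordlist[w] + ' ' + wordlist[w + 1] + ' ' + wordlist[w + 2]
--            for w in range(len(wordlist) - 2)]
--     counts = dict(_runs(sorted(tri)))
--     return {t: counts[t] for t in dict.fromkeys(tri)
--             if counts[t] >= bigram_mincount}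
-- ===== Notes on version B (the rewrite author's own statement) =====
-- stated objective: alternative
-- what changed: B sorts the sliding-window trigram list once and run-length-groups consecutive equal trigrams to get the counts, then emits the first occurrences with count >= 2 via dict.fromkeys, instead of A's mutate-a-dict counting loop followed by a key-deletion pass.
import Mathlib
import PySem

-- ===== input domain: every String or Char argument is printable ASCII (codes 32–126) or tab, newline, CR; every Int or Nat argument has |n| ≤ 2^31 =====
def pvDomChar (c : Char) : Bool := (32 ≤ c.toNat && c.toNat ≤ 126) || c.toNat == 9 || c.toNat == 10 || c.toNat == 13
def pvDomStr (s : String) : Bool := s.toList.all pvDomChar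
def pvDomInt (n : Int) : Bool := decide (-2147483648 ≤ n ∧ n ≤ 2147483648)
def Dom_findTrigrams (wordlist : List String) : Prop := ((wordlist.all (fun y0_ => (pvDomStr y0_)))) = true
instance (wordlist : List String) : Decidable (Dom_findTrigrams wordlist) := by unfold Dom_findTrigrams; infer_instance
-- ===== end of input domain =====

-- B sorts the trigram list once and run-length-groups consecutive equal trigrams to obtain the
-- counts, then emits the first occurrences (dict.fromkeys order) whose count is >= 2, instead of
-- A's dict-counting loop followed by a key-deletion pass; objective: alternative.

-- ===== PORT A =====
-- Literal port of A: a counting loop over range(0, len(wordlist)-2) building a dict, then a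
-- deletion loop over the dict's keys removing entries with count < bigram_mincount (= 2).
-- wordlist[w] is ported as pyGetD with default "": every index w, w+1, w+2 used by the loop is in
-- range, so the default is never read (exact).  featureset[trigram] += 1 (under the guard the key
-- is present) is ported as insert of getD + 1.
def findTrigrams (wordlist : List String) : List (String × Int) :=
  let featureset :=
    (PySem.List.pyRange 0 ((wordlist.length : Int) - 2) 1).foldl
      (fun d w =>
        let word_one := PySem.List.pyGetD wordlist w ""
        let word_two := PySem.List.pyGetD wordlist (w + 1) ""
        let word_three := PySem.List.pyGetD wordlist (w + 2) ""
        let trigram := word_one ++ " " ++ word_two ++ " " ++ word_three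
        if d.contains trigram then d.insert trigram (d.getD trigram 0 + 1)
        else d.insert trigram 1)
      (PySem.Dict.empty : PySem.Dict String Int)
  (featureset.keys.foldl
      (fun d trigram => if d.getD trigram 0 < 2 then d.erase trigram else d)
      featureset).items

-- ===== PORT B =====
-- Literal port of B's _runs: the inner 'while j < n and s[j] == s[i]' counting the rest of the
-- current run becomes the structural recursion pvRunLen over the remaining list; the outer
-- 'while i < n' advancing i to j becomes the recursion pvRuns on the list with the run dropped
-- (the appended pair is (s[i], j - i) = (x, pvRunLen + 1)).
def pvRunLen (t : String) : List String → Nat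
  | [] => 0
  | x :: xs => if x = t then pvRunLen t xs + 1 else 0

def pvRuns : List String → List (String × Int)
  | [] => []
  | x :: xs => (x, ((pvRunLen x xs + 1 : Nat) : Int)) :: pvRuns (xs.drop (pvRunLen x xs))
termination_by s => s.length
decreasing_by simp

-- Literal port of B's findTrigrams: the trigram list comprehension, dict(_runs(sorted(tri))) as a
-- fold of inserts over the run list, and the dict comprehension over dict.fromkeys(tri)
-- (= PySem.List.dedup tri).  counts[t] never raises (t is in tri, hence among the run keys), so it
-- is ported as getD with default 0.
def findTrigrams_alt (wordlist : List String) : List (String × Int) :=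
  let tri :=
    (PySem.List.pyRange 0 ((wordlist.length : Int) - 2) 1).map
      (fun w => PySem.List.pyGetD wordlist w "" ++ " " ++ PySem.List.pyGetD wordlist (w + 1) "" ++ " "
                  ++ PySem.List.pyGetD wordlist (w + 2) "")
  let counts :=
    (pvRuns (PySem.List.sorted tri (fun t => t) false)).foldl
      (fun d p => d.insert p.1 p.2) (PySem.Dict.empty : PySem.Dict String Int)
  ((PySem.List.dedup tri).foldl
      (fun d t => if 2 ≤ counts.getD t 0 then d.insert t (counts.getD t 0) else d)
      (PySem.Dict.empty : PySem.Dict String Int)).items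

-- ===== PRECONDITION & SPEC =====
def Spec_findTrigrams (wordlist : List String) (out : List (String × Int)) : Prop := out = findTrigrams_alt wordlist
instance (wordlist : List String) (out : List (String × Int)) : Decidable (Spec_findTrigrams wordlist out) := by unfold Spec_findTrigrams; infer_instance

-- ===== CLAIM (what is proved, stated in full; the proofs are below) =====
def Claim_equal_findTrigrams : Prop := ∀ (wordlist : List String), Dom_findTrigrams wordlist → Spec_findTrigrams wordlist (findTrigrams wordlist)

-- ===== LEMMAS AND PROOFS =====

-- A's counting loop is collections.Counter.
theorem pv_count_loop (l : List String) :
    l.foldl (fun d t => if d.contains t then d.insert t (d.getD t 0 + 1) else d.insert t 1)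
        PySem.Dict.empty = PySem.Dict.counter l := by
  rw [PySem.List.foldl_congr_mem l _ (fun d t => d.insert t (d.getD t 0 + 1)) _ ?_]
  · exact PySem.Dict.foldl_insert_getD_add_one_eq_counter l
  · intro d t _
    by_cases h : d.contains t = true
    · simp [h]
    · simp only [Bool.not_eq_true] at h
      simp [h, PySem.Dict.getD_of_not_contains d 0 h]

-- A's deletion loop over the keys of a nodup-keyed dict filters its items.
theorem pv_del_loop (ks : List String) : ∀ (d : PySem.Dict String Int), d.keys.Nodup →
    (ks.foldl (fun d t => if d.getD t 0 < 2 then d.erase t else d) d).items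
      = d.items.filter (fun p => !(decide (p.2 < 2) && decide (p.1 ∈ ks))) := by
  induction ks with
  | nil => intro d _; simp
  | cons k ks ih =>
    intro d hd
    simp only [List.foldl_cons]
    have hval : ∀ p ∈ d.items, p.1 = k → p.2 = d.getD k 0 := by
      intro p hp hpk
      have := PySem.Dict.getD_of_mem_items d (k := p.1) (v := p.2) (by simpa using hp) hd 0
      rw [hpk] at this; exact this.symm
    by_cases h : d.getD k 0 < 2
    · rw [if_pos h]
      have hsub : (d.erase k).keys.Sublist d.keys := List.Sublist.map _ List.filter_sublist
      rw [ih _ (hsub.nodup hd)]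
      rw [show (d.erase k).items = d.items.filter (fun p => !(p.1 == k)) from rfl,
        List.filter_filter]
      apply List.filter_congr
      intro p hp
      by_cases hpk : p.1 = k
      · have h2 : p.2 < 2 := (hval p hp hpk) ▸ h
        simp [hpk, h2]
      · simp [hpk, List.mem_cons]
    · rw [if_neg h]
      rw [ih _ hd]
      apply List.filter_congr
      intro p hp
      by_cases hpk : p.1 = k
      · have h2 : ¬ p.2 < 2 := fun hh => h ((hval p hp hpk) ▸ hh)
        simp [h2]
      · simp [hpk, List.mem_cons]

-- The A pipeline over an arbitrary trigram list l, in closed form.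
theorem pv_A_items (l : List String) :
    (((l.foldl (fun d t => if d.contains t then d.insert t (d.getD t 0 + 1) else d.insert t 1)
          PySem.Dict.empty : PySem.Dict String Int)).keys.foldl
        (fun d t => if d.getD t 0 < 2 then d.erase t else d)
        (l.foldl (fun d t => if d.contains t then d.insert t (d.getD t 0 + 1) else d.insert t 1)
          PySem.Dict.empty)).items
      = ((PySem.Set.ofList l).filter (fun t => decide (2 ≤ (l.count t : Int)))).map
          (fun t => (t, (l.count t : Int))) := by
  rw [pv_count_loop]
  rw [pv_del_loop (PySem.Dict.counter l).keys (PySem.Dict.counter l) (PySem.Dict.nodup_keys_counter l),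
    PySem.Dict.keys_counter, PySem.Dict.items_counter, List.filter_map]
  have hpred : ∀ k ∈ PySem.Set.ofList l,
      ((fun p => !(decide ((p : String × Int).2 < 2) && decide (p.1 ∈ PySem.Set.ofList l))) ∘
        (fun k => (k, (l.count k : Int)))) k
        = (fun t => decide (2 ≤ (l.count t : Int))) k := by
    intro k hk
    simp only [Function.comp_apply, hk, decide_true, Bool.and_true, ← decide_not, not_lt]
  rw [List.filter_congr hpred]

-- pvRunLen / drop in terms of takeWhile / dropWhile.
theorem pv_runLen_eq (t : String) (xs : List String) :
    pvRunLen t xs = (xs.takeWhile (fun y => y == t)).length := by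
  induction xs with
  | nil => rfl
  | cons x xs ih => by_cases h : x = t <;> simp [pvRunLen, h, ih]

theorem pv_drop_runLen (t : String) (xs : List String) :
    xs.drop (pvRunLen t xs) = xs.dropWhile (fun y => y == t) := by
  induction xs with
  | nil => rfl
  | cons x xs ih => by_cases h : x = t <;> simp [pvRunLen, h, ih]

-- Unfolding equations for the well-founded recursion pvRuns.
theorem pvRuns_nil : pvRuns [] = [] := by simp [pvRuns]

theorem pvRuns_cons (x : String) (xs : List String) :
    pvRuns (x :: xs) = (x, ((pvRunLen x xs + 1 : Nat) : Int)) :: pvRuns (xs.drop (pvRunLen x xs)) := by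
  simp [pvRuns]

-- In a sorted list headed (conceptually) by x, x does not survive dropping its own run.
theorem pv_not_mem_dropWhile (x : String) : ∀ (xs : List String), xs.Pairwise (· ≤ ·) →
    (∀ y ∈ xs, x ≤ y) → x ∉ xs.dropWhile (fun y => y == x) := by
  intro xs
  induction xs with
  | nil => intro _ _ h; simp at h
  | cons z zs ih =>
    intro hsort hbound hmem
    rw [List.dropWhile_cons] at hmem
    by_cases hz : (z == x) = true
    · rw [if_pos hz] at hmem
      exact ih hsort.of_cons (fun y hy => hbound y (List.mem_cons_of_mem z hy)) hmem
    · rw [if_neg hz] at hmem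
      have hzx : z ≠ x := by simpa using hz
      have hxz : x < z := lt_of_le_of_ne (hbound z List.mem_cons_self) (Ne.symm hzx)
      rcases List.mem_cons.1 hmem with h | h
      · exact hzx h.symm
      · exact absurd (lt_of_lt_of_le hxz (List.rel_of_pairwise_cons hsort h))
          (lt_irrefl x)

-- On a sorted list, pvRuns produces every element's total count, with distinct keys.
theorem pv_runs_spec : ∀ (n : Nat) (s : List String), s.length ≤ n → s.Pairwise (· ≤ ·) →
    (∀ p ∈ pvRuns s, p.1 ∈ s) ∧
    (∀ t ∈ s, (t, (s.count t : Int)) ∈ pvRuns s) ∧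
    ((pvRuns s).map Prod.fst).Nodup := by
  intro n
  induction n with
  | zero =>
    intro s hs _
    have : s = [] := List.length_eq_zero_iff.1 (Nat.le_zero.1 hs)
    subst this
    simp [pvRuns_nil]
  | succ n ih =>
    intro s hlen hsort
    match s with
    | [] => simp [pvRuns_nil]
    | x :: xs =>
      have hx : ∀ y ∈ xs, x ≤ y := fun y hy => List.rel_of_pairwise_cons hsort hy
      have htail : xs.Pairwise (· ≤ ·) := hsort.of_cons
      have hxs : xs.takeWhile (fun y => y == x) ++ xs.dropWhile (fun y => y == x) = xs :=
        List.takeWhile_append_dropWhile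
      have htw : ∀ y ∈ xs.takeWhile (fun y => y == x), y = x := by
        intro y hy
        simpa using List.mem_takeWhile_imp hy
      have hdwsub : (xs.dropWhile (fun y => y == x)).Sublist xs := List.dropWhile_sublist _
      have hdwsort : (xs.dropWhile (fun y => y == x)).Pairwise (· ≤ ·) := htail.sublist hdwsub
      have hxdw : x ∉ xs.dropWhile (fun y => y == x) := pv_not_mem_dropWhile x xs htail hx
      have hk : pvRunLen x xs = (xs.takeWhile (fun y => y == x)).length := pv_runLen_eq x xs
      have hdrop : xs.drop (pvRunLen x xs) = xs.dropWhile (fun y => y == x) := pv_drop_runLen x xs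
      have hcount_tw : ∀ t, (xs.takeWhile (fun y => y == x)).count t
          = if t = x then (xs.takeWhile (fun y => y == x)).length else 0 := by
        intro t
        by_cases ht : t = x
        · subst ht
          rw [if_pos rfl]
          exact List.count_eq_length.2 (fun b hb => (htw b hb).symm)
        · rw [if_neg ht]
          exact List.count_eq_zero.2 (fun hmem => ht (htw t hmem))
      have hcount_dw_x : (xs.dropWhile (fun y => y == x)).count x = 0 :=
        List.count_eq_zero.2 hxdw
      have hsplit : ∀ t, xs.count t = (xs.takeWhile (fun y => y == x)).count t
          + (xs.dropWhile (fun y => y == x)).count t := by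
        intro t
        conv_lhs => rw [← hxs]
        rw [List.count_append]
      have hcx : (x :: xs).count x = (xs.takeWhile (fun y => y == x)).length + 1 := by
        rw [show (x :: xs).count x = xs.count x + 1 by simp, hsplit,
          hcount_tw, if_pos rfl, hcount_dw_x]
      have hct : ∀ t, t ≠ x →
          (x :: xs).count t = (xs.dropWhile (fun y => y == x)).count t := by
        intro t ht
        rw [show (x :: xs).count t = xs.count t by simp [Ne.symm ht],
          hsplit, hcount_tw, if_neg ht, Nat.zero_add]
      have hdwlen : (xs.dropWhile (fun y => y == x)).length ≤ n := by
        have h1 := hdwsub.length_le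
        have h2 : xs.length + 1 ≤ n + 1 := by simpa using hlen
        omega
      obtain ⟨iha, ihb, ihc⟩ := ih (xs.dropWhile (fun y => y == x)) hdwlen hdwsort
      have hruns : pvRuns (x :: xs)
          = (x, (((xs.takeWhile (fun y => y == x)).length + 1 : Nat) : Int))
              :: pvRuns (xs.dropWhile (fun y => y == x)) := by
        rw [pvRuns_cons, hdrop, hk]
      refine ⟨?_, ?_, ?_⟩
      · intro p hp
        rw [hruns] at hp
        rcases List.mem_cons.1 hp with h | hp
        · rw [h]; exact List.mem_cons_self
        · exact List.mem_cons_of_mem x (by rw [← hxs]; exact List.mem_append_right _ (iha p hp))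
      · intro t ht
        rw [hruns]
        by_cases htx : t = x
        · subst htx
          rw [hcx]
          exact List.mem_cons_self
        · have htxs : t ∈ xs := by
            rcases List.mem_cons.1 ht with h | h
            · exact absurd h htx
            · exact h
          have htdw : t ∈ xs.dropWhile (fun y => y == x) := by
            rcases List.mem_append.1 (by rw [hxs]; exact htxs) with h | h
            · exact absurd (htw t h) htx
            · exact h
          rw [hct t htx]
          exact List.mem_cons_of_mem _ (ihb t htdw)
      · rw [hruns]
        simp only [List.map_cons, List.nodup_cons]
        refine ⟨?_, ihc⟩
        intro hmem
        rcases List.mem_map.1 hmem with ⟨p, hp, hpx⟩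
        exact hxdw (hpx ▸ iha p hp)

-- The counts dict built from the runs of sorted(l) looks up each element's count in l.
theorem pv_counts_getD (l : List String) (t : String) (ht : t ∈ l) :
    ((pvRuns (PySem.List.sorted l (fun x => x) false)).foldl (fun d p => d.insert p.1 p.2)
        (PySem.Dict.empty : PySem.Dict String Int)).getD t 0 = (l.count t : Int) := by
  set s := PySem.List.sorted l (fun x => x) false with hs
  have hperm : s.Perm l := PySem.List.sorted_perm l (fun x => x) false
  have hsort : s.Pairwise (· ≤ ·) := by
    have := PySem.List.sorted_pairwise l (fun x => x)
    simpa using this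
  obtain ⟨ha, hb, hc⟩ := pv_runs_spec s.length s le_rfl hsort
  have hts : t ∈ s := hperm.mem_iff.2 ht
  have hitems : ((pvRuns s).foldl (fun d p => d.insert p.1 p.2)
      (PySem.Dict.empty : PySem.Dict String Int)).items
      = (PySem.Dict.empty : PySem.Dict String Int).items
          ++ (pvRuns s).map (fun p => (p.1, p.2)) :=
    PySem.Dict.items_foldl_insert_fresh (pvRuns s) (fun p => p.1) (fun p => p.2)
      PySem.Dict.empty (fun a _ => by simp [PySem.Dict.contains_empty]) hc
  have hnd : ((pvRuns s).foldl (fun d p => d.insert p.1 p.2)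
      (PySem.Dict.empty : PySem.Dict String Int)).keys.Nodup :=
    PySem.Dict.nodup_keys_foldl_insert_key (pvRuns s) (fun p => p.1) (fun _ p => p.2)
      PySem.Dict.empty List.nodup_nil
  have hmem : (t, (s.count t : Int)) ∈ ((pvRuns s).foldl (fun d p => d.insert p.1 p.2)
      (PySem.Dict.empty : PySem.Dict String Int)).items := by
    rw [hitems]
    refine List.mem_append_right _ ?_
    simpa using List.mem_map_of_mem (f := fun p : String × Int => (p.1, p.2)) (hb t hts)
  have := PySem.Dict.getD_of_mem_items _ hmem hnd 0
  rw [this, hperm.count_eq]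

-- The B result-building fold over dict.fromkeys(tri), in closed form.
theorem pv_B_items (l : List String) :
    ((PySem.List.dedup l).foldl
        (fun d t =>
          if 2 ≤ ((pvRuns (PySem.List.sorted l (fun x => x) false)).foldl
              (fun d p => d.insert p.1 p.2)
              (PySem.Dict.empty : PySem.Dict String Int)).getD t 0
          then d.insert t (((pvRuns (PySem.List.sorted l (fun x => x) false)).foldl
              (fun d p => d.insert p.1 p.2)
              (PySem.Dict.empty : PySem.Dict String Int)).getD t 0)
          else d)
        (PySem.Dict.empty : PySem.Dict String Int)).items
      = ((PySem.Set.ofList l).filter (fun t => decide (2 ≤ (l.count t : Int)))).map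
          (fun t => (t, (l.count t : Int))) := by
  rw [PySem.List.foldl_congr_mem (PySem.List.dedup l) _
      (fun d t => if 2 ≤ (l.count t : Int) then d.insert t ((l.count t : Int)) else d) _ ?_]
  · rw [PySem.List.foldl_ite_eq_foldl_filter]
    have hnodup : (((PySem.List.dedup l).filter
        (fun t => decide (2 ≤ (l.count t : Int)))).map (fun t => t)).Nodup := by
      simpa using (PySem.List.nodup_dedup l).filter (fun t => decide (2 ≤ (l.count t : Int)))
    have := PySem.Dict.items_foldl_insert_fresh
      ((PySem.List.dedup l).filter (fun t => decide (2 ≤ (l.count t : Int))))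
      (fun t => t) (fun t => (l.count t : Int))
      (PySem.Dict.empty : PySem.Dict String Int)
      (fun a _ => by simp [PySem.Dict.contains_empty]) hnodup
    rw [this]
    simp [PySem.List.dedup_eq_ofList, show (PySem.Dict.empty : PySem.Dict String Int).items = [] from rfl]
  · intro d t htmem
    have : t ∈ l := (PySem.List.mem_dedup _ _).1 htmem
    rw [pv_counts_getD l t this]

-- ===== VERDICT (by name: the statement is the Claim_ definition above) =====
theorem findTrigrams_spec : Claim_equal_findTrigrams := by
  intro wordlist _
  show findTrigrams wordlist = findTrigrams_alt wordlist
  have hA := pv_A_items ((PySem.List.pyRange 0 ((wordlist.length : Int) - 2) 1).map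
      (fun w => PySem.List.pyGetD wordlist w "" ++ " " ++ PySem.List.pyGetD wordlist (w + 1) "" ++ " "
                  ++ PySem.List.pyGetD wordlist (w + 2) ""))
  have hB := pv_B_items ((PySem.List.pyRange 0 ((wordlist.length : Int) - 2) 1).map
      (fun w => PySem.List.pyGetD wordlist w "" ++ " " ++ PySem.List.pyGetD wordlist (w + 1) "" ++ " "
                  ++ PySem.List.pyGetD wordlist (w + 2) ""))
  refine Eq.trans ?_ (hA.trans hB.symm)
  unfold findTrigrams
  rw [List.foldl_map]
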